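-- pv_equiv track=rewrite | github.com/PermissionLabs/eth-staker-analytics | filters.py | get_intersection_addresses
-- ===== SOURCE A (Python) =====
-- from typing import Optional, List, Any, Set, Tuple
--
-- def get_intersection_addresses(
--     sets: List[Set[str]],
--     include_indices: List[int],
--     exclude_indices: List[int]
-- ) -> Set[str]:
--     """
--     Get addresses that are in specified sets and not in others.
--
--     Args:
--         sets: List of address sets
--         include_indices: Indices of sets to intersect
--         exclude_indices: Indices of sets to exclude
--
--     Returns:
--         Set of addresses matching criteria
--     """
--     if not include_indices:
--         return set()
--
--     result = sets[include_indices[0]].copy()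
--     for idx in include_indices[1:]:
--         result &= sets[idx]
--
--     for idx in exclude_indices:
--         result -= sets[idx]
--
--     return result
-- ===== SOURCE B (Python) =====
-- from typing import List, Set
--
-- def get_intersection_addresses(
--     sets: List[Set[str]],
--     include_indices: List[int],
--     exclude_indices: List[int]
-- ) -> Set[str]:
--     if not include_indices:
--         return set()
--     banned = set()
--     for i in exclude_indices:
--         banned |= sets[i]
--     needed = len(include_indices)
--     out = set()
--     for a in sets[include_indices[0]]:
--         hits = 0
--         for i in include_indices:
--             if a in sets[i]:
--                 hits += 1
--         if hits == needed and a not in banned: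
--             out.add(a)
--     return out
-- ===== Notes on version B (the rewrite author's own statement) =====
-- stated objective: alternative
-- what changed: Instead of A's incremental set algebra (copy then repeated &= and -=), B precomputes one banned union of all excluded sets, then scans the first included set once, counting for each address how many included sets contain it and adding it to a fresh result set iff the count equals len(include_indices) and it is not banned.
import Mathlib
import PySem

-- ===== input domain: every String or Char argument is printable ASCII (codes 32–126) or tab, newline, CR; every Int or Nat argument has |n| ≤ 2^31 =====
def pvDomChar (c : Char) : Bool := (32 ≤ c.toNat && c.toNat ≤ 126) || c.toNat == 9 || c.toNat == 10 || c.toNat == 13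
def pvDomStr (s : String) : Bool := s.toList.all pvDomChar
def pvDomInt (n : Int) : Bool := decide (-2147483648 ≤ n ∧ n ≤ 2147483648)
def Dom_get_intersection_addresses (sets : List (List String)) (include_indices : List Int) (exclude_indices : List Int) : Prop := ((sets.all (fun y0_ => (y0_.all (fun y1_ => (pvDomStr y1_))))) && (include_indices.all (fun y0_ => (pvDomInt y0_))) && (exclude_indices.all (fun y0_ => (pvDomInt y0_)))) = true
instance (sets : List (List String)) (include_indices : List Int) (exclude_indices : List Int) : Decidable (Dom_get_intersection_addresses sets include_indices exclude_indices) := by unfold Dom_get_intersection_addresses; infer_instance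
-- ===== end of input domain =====

-- B replaces A's incremental set algebra (copy, &=, -=) by: precompute the union of excluded
-- sets, then one scan over the first included set counting per-address membership hits across
-- all included sets; objective: alternative decomposition, same cost.

-- ===== PORT A =====
def get_intersection_addresses (sets : List (List String)) (include_indices : List Int) (exclude_indices : List Int) : List String :=
  match include_indices with
  | [] => []
  | i0 :: rest =>
    let result := PySem.List.pyGetD sets i0 []   -- sets[include_indices[0]].copy()
    let result := rest.foldl (fun r idx => PySem.Set.inter r (PySem.List.pyGetD sets idx [])) result
    exclude_indices.foldl (fun r idx => PySem.Set.diff r (PySem.List.pyGetD sets idx [])) result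

-- ===== PORT B =====
def get_intersection_addresses_alt (sets : List (List String)) (include_indices : List Int) (exclude_indices : List Int) : List String :=
  match include_indices with
  | [] => []
  | i0 :: _ =>
    let banned : PySem.Set String :=
      exclude_indices.foldl (fun b i => PySem.Set.union b (PySem.List.pyGetD sets i [])) PySem.Set.empty
    let needed : Int := include_indices.length
    (PySem.List.pyGetD sets i0 []).foldl
      (fun out a =>
        let hits : Int := include_indices.foldl
          (fun h i => if (PySem.List.pyGetD sets i []).contains a then h + 1 else h) 0
        if hits == needed && !(PySem.Set.contains banned a) then PySem.Set.add out a else out)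
      PySem.Set.empty

-- ===== PRECONDITION & SPEC =====
-- Pre_ excludes (i) the inputs where Python A raises IndexError — a nonempty include list with
-- some accessed index out of range (negative indexing allowed) — and (ii) lists in `sets` with
-- duplicate elements, which are not encodings of Python sets at all (Set[str] holds distinct
-- elements under the type convention, so this excludes no Python input).
def Pre_get_intersection_addresses (sets : List (List String)) (include_indices : List Int) (exclude_indices : List Int) : Prop :=
  (∀ s ∈ sets, s.Nodup) ∧
  (include_indices = [] ∨
    ((∀ i ∈ include_indices, PySem.Raise.InRange sets.length i) ∧
     (∀ i ∈ exclude_indices, PySem.Raise.InRange sets.length i)))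
instance (sets : List (List String)) (include_indices : List Int) (exclude_indices : List Int) : Decidable (Pre_get_intersection_addresses sets include_indices exclude_indices) := by unfold Pre_get_intersection_addresses; infer_instance
def pvWitness_get_intersection_addresses : List (List String) × List Int × List Int :=
  ([["a", "b"], ["b", "c"]], [0, 1], [1])

def Spec_get_intersection_addresses (sets : List (List String)) (include_indices : List Int) (exclude_indices : List Int) (out : List String) : Prop := out = get_intersection_addresses_alt sets include_indices exclude_indices
instance (sets : List (List String)) (include_indices : List Int) (exclude_indices : List Int) (out : List String) : Decidable (Spec_get_intersection_addresses sets include_indices exclude_indices out) := by unfold Spec_get_intersection_addresses; infer_instance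

-- ===== CLAIM =====
def Claim_equal_get_intersection_addresses : Prop := ∀ (sets : List (List String)) (include_indices : List Int) (exclude_indices : List Int), Dom_get_intersection_addresses sets include_indices exclude_indices → Pre_get_intersection_addresses sets include_indices exclude_indices → Spec_get_intersection_addresses sets include_indices exclude_indices (get_intersection_addresses sets include_indices exclude_indices)

-- ===== LEMMAS AND PROOFS =====

-- A's fold of intersections is a single filter by "in every set"
theorem foldl_inter_eq_filter (g : Int → List String) (l : List Int) (r : List String) :
    l.foldl (fun r i => PySem.Set.inter r (g i)) r
      = r.filter (fun a => l.all (fun i => (g i).contains a)) := by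
  induction l generalizing r with
  | nil => simp
  | cons x xs ih =>
    rw [List.foldl_cons, ih]
    show (r.filter (fun a => (g x).contains a)).filter _ = _
    rw [List.filter_filter]
    apply List.filter_congr
    intro a _
    simp [List.all_cons, Bool.and_comm]

-- A's fold of differences is a single filter by "in no set"
theorem foldl_diff_eq_filter (g : Int → List String) (l : List Int) (r : List String) :
    l.foldl (fun r i => PySem.Set.diff r (g i)) r
      = r.filter (fun a => !(l.any (fun i => (g i).contains a))) := by
  induction l generalizing r with
  | nil => simp
  | cons x xs ih =>
    rw [List.foldl_cons, ih]
    show (r.filter (fun a => !(g x).contains a)).filter _ = _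
    rw [List.filter_filter]
    apply List.filter_congr
    intro a _
    simp [List.any_cons, Bool.and_comm]

-- the banned union contains exactly the elements of some excluded set
theorem mem_foldl_union (g : Int → List String) (l : List Int) (s : List String) (a : String) :
    a ∈ l.foldl (fun b i => PySem.Set.union b (g i)) s ↔ a ∈ s ∨ ∃ i ∈ l, a ∈ g i := by
  induction l generalizing s with
  | nil => simp
  | cons x xs ih =>
    rw [List.foldl_cons, ih]
    simp [PySem.Set.mem_union, or_assoc]

-- B's hit counter is a countP
theorem foldl_hits_eq_countP (p : Int → Bool) (l : List Int) (c : Int) :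
    l.foldl (fun h i => if p i then h + 1 else h) c = c + (l.countP p : Int) := by
  induction l generalizing c with
  | nil => simp
  | cons x xs ih =>
    rw [List.foldl_cons]
    by_cases hx : p x
    · simp [hx, ih]; ring
    · simp [hx, ih]

-- B's conditional Set.add loop over a duplicate-free list is a filter
theorem foldl_add_eq_filter (q : String → Bool) (base : List String) (hnd : base.Nodup)
    (acc : List String) (hacc : ∀ a ∈ base, a ∉ acc) :
    base.foldl (fun out a => if q a then PySem.Set.add out a else out) acc
      = acc ++ base.filter q := by
  induction base generalizing acc with
  | nil => simp
  | cons x xs ih =>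
    rw [List.foldl_cons]
    rcases List.nodup_cons.mp hnd with ⟨hx, hxs⟩
    by_cases hq : q x
    · rw [if_pos hq, PySem.Set.add_of_not_mem (hacc x (by simp))]
      rw [ih hxs (acc ++ [x]) (by
        intro a ha
        simp only [List.mem_append, List.mem_singleton]
        rintro (h | rfl)
        · exact hacc a (by simp [ha]) h
        · exact hx ha)]
      simp [hq]
    · rw [if_neg hq, ih hxs acc (fun a ha => hacc a (by simp [ha]))]
      simp [hq]

-- ===== VERDICT =====
theorem get_intersection_addresses_spec : Claim_equal_get_intersection_addresses := by
  intro sets inc exc _ hpre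
  obtain ⟨hnd, _⟩ := hpre
  unfold Spec_get_intersection_addresses get_intersection_addresses get_intersection_addresses_alt
  match inc with
  | [] => rfl
  | i0 :: rest =>
    dsimp only
    rw [foldl_inter_eq_filter, foldl_diff_eq_filter, List.filter_filter]
    have hbn : (PySem.List.pyGetD sets i0 ([] : List String)).Nodup := by
      unfold PySem.List.pyGetD
      cases hg : PySem.List.pyGet? sets i0 with
      | none => simp
      | some s =>
        simpa using hnd s (PySem.List.mem_of_pyGet?_eq_some _ hg)
    rw [foldl_add_eq_filter
      (fun a =>
        (List.foldl (fun h i => if (PySem.List.pyGetD sets i ([] : List String)).contains a then h + 1 else h) (0 : Int) (i0 :: rest))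
          == ((i0 :: rest).length : Int)
        && !(PySem.Set.contains (exc.foldl (fun b i => PySem.Set.union b (PySem.List.pyGetD sets i [])) PySem.Set.empty) a))
      _ hbn PySem.Set.empty (by simp [PySem.Set.empty])]
    simp only [PySem.Set.empty, List.nil_append]
    apply List.filter_congr
    intro a ha
    rw [Bool.eq_iff_iff]
    have hmemb : ((exc.foldl (fun b i => PySem.Set.union b (PySem.List.pyGetD sets i [])) ([] : List String)).contains a = false)
        ↔ ∀ i ∈ exc, a ∉ PySem.List.pyGetD sets i ([] : List String) := by
      rw [Bool.eq_false_iff, Ne, PySem.Set.contains_iff, mem_foldl_union]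
      simp
    have hi0 : a ∈ PySem.List.pyGetD sets i0 ([] : List String) := ha
    simp only [foldl_hits_eq_countP, zero_add, Bool.and_eq_true, Bool.not_eq_true',
      beq_iff_eq, Int.natCast_inj, List.countP_eq_length,
      List.all_eq_true, List.any_eq_false]
    constructor
    · rintro ⟨h2, h1⟩
      refine ⟨fun i hi => ?_, hmemb.mpr (fun i hi hm => h2 i hi (by simpa using hm))⟩
      rcases List.mem_cons.mp hi with rfl | hi
      · simpa using hi0
      · exact h1 i hi
    · rintro ⟨h1, h2⟩
      exact ⟨fun i hi hm => (hmemb.mp h2) i hi (by simpa using hm), fun i hi => h1 i (List.mem_cons.mpr (Or.inr hi))⟩
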